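-- pv_equiv track=rewrite | github.com/pypi-data/pypi-mirror-390 | packages/pyhtml-cem/pyhtml_cem-0.1.0-py3-none-any.whl/pyhtml_cem/cem_parser.py | generate_components_init
-- ===== SOURCE A (Python) =====
-- from typing import Any
--
-- def generate_components_init(
--     components: list[dict[str, Any]], prefix_to_strip: str = ""
-- ) -> str:
--     """
--     Generate __init__.py for components/ directory.
--
--     Args:
--         components: List of component metadata dictionaries
--         prefix_to_strip: Optional prefix to strip from component class names
--
--     Returns:
--         Python code for components/__init__.py with all imports
--     """
--     output = []
--     output.append('"""All generated components."""')
--     output.append("")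
--
--     # Generate imports
--     for comp in components:
--         tag_name = comp["tag"]
--         full_class_name = tag_name.replace("-", "_")
--
--         if prefix_to_strip and full_class_name.startswith(prefix_to_strip + "_"):
--             class_name = full_class_name[len(prefix_to_strip) + 1 :]
--         else:
--             class_name = full_class_name
--
--         module_name = (
--             full_class_name.replace(
--                 tag_name.split("-")[0] + "_", "", 1
--             )  # FIX: Redundant and/or precarious
--             if "_" in full_class_name
--             else full_class_name
--         )
--         output.append(f"from .{module_name} import {class_name}")
--
--     output.append("")
--     output.append("__all__ = [")
--     for comp in components:
--         tag_name = comp["tag"]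
--         full_class_name = tag_name.replace("-", "_")
--
--         # Determine the actual class name
--         if prefix_to_strip and full_class_name.startswith(prefix_to_strip + "_"):
--             class_name = full_class_name[len(prefix_to_strip) + 1 :]
--         else:
--             class_name = full_class_name
--
--         output.append(f'    "{class_name}",')
--     output.append("]")
--
--     return "\n".join(output)
-- ===== SOURCE B (Python) =====
-- def _import_line(comp, prefix_to_strip):
--     tag = comp["tag"]
--     full = tag.replace("-", "_")
--     cls = full.removeprefix(prefix_to_strip + "_") if prefix_to_strip else full
--     mod = full.replace(tag.partition("-")[0] + "_", "", 1)
--     return f"from .{mod} import {cls}\n"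
--
--
-- def _all_line(comp, prefix_to_strip):
--     tag = comp["tag"]
--     full = tag.replace("-", "_")
--     cls = full.removeprefix(prefix_to_strip + "_") if prefix_to_strip else full
--     return f'    "{cls}",\n'
--
--
-- def generate_components_init(components, prefix_to_strip=""):
--     # One pass, two growing string accumulators, assembled by direct concatenation
--     # (no line list / join).  Class name via removeprefix; the "_" guard of the
--     # original is dropped because the removed pattern itself contains "_", so the
--     # replace is already a no-op when full has no underscore.
--     imports = ""
--     alls = ""
--     for comp in components:
--         imports += _import_line(comp, prefix_to_strip)
--         alls += _all_line(comp, prefix_to_strip)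
--     return ('"""All generated components."""\n\n'
--             + imports + "\n__all__ = [\n" + alls + "]")
-- ===== Notes on version B (the rewrite author's own statement) =====
-- stated objective: simpler
-- what changed: A single pass over components grows two string accumulators (import lines, __all__ entries) assembled by direct concatenation instead of A's two loops over a shared line list joined at the end; the class name uses removeprefix and the redundant '_'-membership guard around the module-name replace is dropped (the removed pattern itself contains '_').
-- outside the precondition, e.g. on generate_components_init([{}], ''): A raises KeyError, B raises KeyError
import Mathlib
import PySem

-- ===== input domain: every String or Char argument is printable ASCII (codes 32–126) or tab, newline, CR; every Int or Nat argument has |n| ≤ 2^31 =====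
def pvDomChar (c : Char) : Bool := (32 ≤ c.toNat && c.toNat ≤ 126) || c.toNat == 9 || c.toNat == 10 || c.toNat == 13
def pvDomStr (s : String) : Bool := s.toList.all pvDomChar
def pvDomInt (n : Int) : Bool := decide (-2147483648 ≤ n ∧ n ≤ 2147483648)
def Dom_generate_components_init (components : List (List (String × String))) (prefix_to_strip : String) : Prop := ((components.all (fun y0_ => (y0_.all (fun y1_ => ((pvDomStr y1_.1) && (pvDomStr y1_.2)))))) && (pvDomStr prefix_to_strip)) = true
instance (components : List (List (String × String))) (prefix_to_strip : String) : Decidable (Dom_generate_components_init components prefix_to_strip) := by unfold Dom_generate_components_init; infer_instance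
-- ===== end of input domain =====

-- B builds the file in ONE pass with two growing string accumulators and direct concatenation
-- (no line list / join), using removeprefix and dropping A's redundant "_" guard; return value only.

-- ===== PORT A =====
-- shared primitive: Python's s.replace(pat, "", 1) — remove the FIRST occurrence of pat
-- (exact: left-to-right scan; for pat = "" Python inserts "" before the first char, i.e. returns s, as here).
def pvRemoveFirst (s pat : List Char) : List Char :=
  match s with
  | [] => []
  | c :: rest =>
    if pat.isPrefixOf (c :: rest) then (c :: rest).drop pat.length
    else c :: pvRemoveFirst rest pat

def pvReplaceOnce (s pat : String) : String := String.ofList (pvRemoveFirst s.toList pat.toList)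

def generate_components_init (components : List (List (String × String))) (prefix_to_strip : String) : String :=
  let output : List String := ["\"\"\"All generated components.\"\"\"", ""]
  let output := components.foldl (fun output comp =>
    -- comp["tag"]: Pre_ guarantees the key is present (Python raises KeyError otherwise)
    let tag_name := (PySem.Dict.mk comp).getD "tag" ""
    let full_class_name := PySem.Str.replace tag_name "-" "_"
    let class_name :=
      if (prefix_to_strip != "") && PySem.Str.startswith full_class_name (prefix_to_strip ++ "_")
      then PySem.Str.slice full_class_name (some (PySem.Str.len prefix_to_strip + 1)) none
      else full_class_name
    -- tag_name.split("-")[0]: split with a non-empty separator is always a non-empty list, so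
    -- the getD/headD defaults are never taken and the [0] indexing is exact
    let module_name :=
      if PySem.Str.isIn "_" full_class_name
      then pvReplaceOnce full_class_name ((((PySem.Str.split? tag_name "-").getD []).headD "") ++ "_")
      else full_class_name
    output ++ ["from ." ++ module_name ++ " import " ++ class_name]) output
  let output := output ++ ["", "__all__ = ["]
  let output := components.foldl (fun output comp =>
    let tag_name := (PySem.Dict.mk comp).getD "tag" ""
    let full_class_name := PySem.Str.replace tag_name "-" "_"
    let class_name :=
      if (prefix_to_strip != "") && PySem.Str.startswith full_class_name (prefix_to_strip ++ "_")
      then PySem.Str.slice full_class_name (some (PySem.Str.len prefix_to_strip + 1)) none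
      else full_class_name
    output ++ ["    \"" ++ class_name ++ "\","]) output
  let output := output ++ ["]"]
  PySem.Str.join "\n" output

-- ===== PORT B =====
-- Python's s.removeprefix(pat): drop pat if it is a prefix, else unchanged (exact).
def pvRemovePrefix (s pat : List Char) : List Char :=
  if pat.isPrefixOf s then s.drop pat.length else s

def pvImportLine (comp : List (String × String)) (prefix_to_strip : String) : String :=
  let tag := (PySem.Dict.mk comp).getD "tag" ""   -- comp["tag"], present under Pre_
  let full := PySem.Str.replace tag "-" "_"
  let cls :=
    if prefix_to_strip != ""
    then String.ofList (pvRemovePrefix full.toList (prefix_to_strip ++ "_").toList)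
    else full
  -- tag.partition("-")[0]: the chars before the first "-" — takeWhile is exact for a
  -- single-character separator
  let mod := String.ofList (pvRemoveFirst full.toList (tag.toList.takeWhile (· != '-') ++ ['_']))
  "from ." ++ mod ++ " import " ++ cls ++ "\n"

def pvAllLine (comp : List (String × String)) (prefix_to_strip : String) : String :=
  let tag := (PySem.Dict.mk comp).getD "tag" ""
  let full := PySem.Str.replace tag "-" "_"
  let cls :=
    if prefix_to_strip != ""
    then String.ofList (pvRemovePrefix full.toList (prefix_to_strip ++ "_").toList)
    else full
  "    \"" ++ cls ++ "\",\n"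

def generate_components_init_alt (components : List (List (String × String))) (prefix_to_strip : String) : String :=
  -- one pass, two string accumulators (imports, alls)
  let acc := components.foldl (fun (acc : String × String) comp =>
    (acc.1 ++ pvImportLine comp prefix_to_strip,
     acc.2 ++ pvAllLine comp prefix_to_strip)) ("", "")
  "\"\"\"All generated components.\"\"\"\n\n" ++ acc.1 ++ ("\n__all__ = [\n" ++ acc.2 ++ "]")

-- ===== PRECONDITION & SPEC =====
-- Pre_ excludes only components missing the "tag" key, on which A raises KeyError.
def Pre_generate_components_init (components : List (List (String × String))) (prefix_to_strip : String) : Prop :=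
  (components.all (fun comp => comp.any (fun kv => kv.1 == "tag"))) = true
instance (components : List (List (String × String))) (prefix_to_strip : String) : Decidable (Pre_generate_components_init components prefix_to_strip) := by unfold Pre_generate_components_init; infer_instance

def pvWitness_generate_components_init : (List (List (String × String))) × String :=
  ([[("tag", "x-button")], [("tag", "x-card")]], "x")

def Spec_generate_components_init (components : List (List (String × String))) (prefix_to_strip : String) (out : String) : Prop := out = generate_components_init_alt components prefix_to_strip
instance (components : List (List (String × String))) (prefix_to_strip : String) (out : String) : Decidable (Spec_generate_components_init components prefix_to_strip out) := by unfold Spec_generate_components_init; infer_instance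

-- ===== CLAIM =====
def Claim_equal_generate_components_init : Prop := ∀ (components : List (List (String × String))) (prefix_to_strip : String), Dom_generate_components_init components prefix_to_strip → Pre_generate_components_init components prefix_to_strip → Spec_generate_components_init components prefix_to_strip (generate_components_init components prefix_to_strip)

-- ===== LEMMAS AND PROOFS =====


-- generic: a foldl appending g-pieces to a string accumulator, at the char level
theorem pvFoldlStrAppend {α : Type} (g : α → String) (l : List α) (s0 : String) :
    (l.foldl (fun s c => s ++ g c) s0).toList = s0.toList ++ (l.map (fun c => (g c).toList)).flatten := by
  induction l generalizing s0 with
  | nil => simp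
  | cons a t ih => simp [ih]

-- join with a non-empty tail: the leading blocks each contribute "block ++ sep"
theorem pvJoinAppend (nl : List Char) (L t : List (List Char)) (ht : t ≠ []) :
    PySem.Chars.join nl (L ++ t) = (L.map (· ++ nl)).flatten ++ PySem.Chars.join nl t := by
  induction L with
  | nil => simp
  | cons x L ih =>
    cases hL : L ++ t with
    | nil => cases t with
      | nil => exact absurd rfl ht
      | cons y r => simp at hL
    | cons y r =>
      show PySem.Chars.join nl (x :: (L ++ t)) = _
      rw [hL, PySem.Chars.join_cons_cons, ← hL, ih]
      simp

-- splitOn.go: the accumulator is prepended reversed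
theorem pvSplitGoAcc (sep : List Char) (fuel : Nat) (l cur : List Char) (acc : List (List Char)) :
    PySem.Chars.splitOn.go sep fuel l cur acc = acc.reverse ++ PySem.Chars.splitOn.go sep fuel l cur [] := by
  induction fuel generalizing l cur acc with
  | zero => rw [PySem.Chars.splitOn.go.eq_def, PySem.Chars.splitOn.go.eq_def]; simp
  | succ n ih =>
    cases l with
    | nil => rw [PySem.Chars.splitOn.go.eq_def, PySem.Chars.splitOn.go.eq_def]; simp
    | cons c rest =>
      rw [PySem.Chars.splitOn.go.eq_def, PySem.Chars.splitOn.go.eq_def]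
      simp only []
      split
      · rw [ih _ _ (cur.reverse :: acc), ih _ _ [cur.reverse]]
        simp
      · exact ih _ _ _

-- first piece of split('-') = chars before the first '-'
theorem pvSplitGoHead (fuel : Nat) (l cur : List Char) (h : l.length < fuel) :
    (PySem.Chars.splitOn.go ['-'] fuel l cur []).headD [] = cur.reverse ++ l.takeWhile (· != '-') := by
  induction fuel generalizing l cur with
  | zero => omega
  | succ n ih =>
    cases l with
    | nil => simp [PySem.Chars.splitOn.go]
    | cons c rest =>
      rw [PySem.Chars.splitOn.go.eq_def]
      by_cases hc : c = '-'
      · have hpre : List.isPrefixOf ['-'] (c :: rest) = true := by simp [hc, List.isPrefixOf]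
        simp only [hpre, if_true]
        rw [pvSplitGoAcc]
        simp [hc]
      · have hpre : List.isPrefixOf ['-'] (c :: rest) = false := by
          simp [List.isPrefixOf]; exact fun h => absurd h.symm hc
        simp only [hpre, Bool.false_eq_true, if_false]
        rw [ih rest (c :: cur) (by simpa using Nat.lt_of_succ_lt_succ h)]
        simp [hc]
      
theorem pvSplitHead (tag : String) :
    ((((PySem.Str.split? tag "-").getD []).headD "") : String).toList = tag.toList.takeWhile (· != '-') := by
  have h1 : PySem.Str.split? tag "-"
      = some ((PySem.Chars.splitOn tag.toList ['-']).map String.ofList) := by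
    simp [PySem.Str.split?, PySem.Chars.split?]
  rw [h1, Option.getD_some]
  have h2 : ("" : String) = String.ofList [] := rfl
  rw [h2, List.headD_map, String.toList_ofList]
  unfold PySem.Chars.splitOn
  exact pvSplitGoHead _ _ _ (by omega)

-- pattern containing a char absent from s is never removed
theorem pvRemoveFirstNoop (s pat : List Char) (c : Char) (hc : c ∈ pat) (hs : c ∉ s) :
    pvRemoveFirst s pat = s := by
  induction s with
  | nil => rfl
  | cons a rest ih =>
    rw [pvRemoveFirst]
    have hpre : pat.isPrefixOf (a :: rest) = false := by
      by_contra hcon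
      exact hs (List.IsPrefix.mem hc (List.isPrefixOf_iff_prefix.mp (by simpa using hcon)))
    simp only [hpre, Bool.false_eq_true, if_false, List.cons.injEq, true_and]
    exact ih (fun h => hs (List.mem_cons_of_mem _ h))

-- the two class-name computations agree
theorem pvClsEq (full p : String) :
    (if (p != "") && PySem.Str.startswith full (p ++ "_") then PySem.Str.slice full (some (PySem.Str.len p + 1)) none else full)
      = (if p != "" then String.ofList (pvRemovePrefix full.toList (p ++ "_").toList) else full) := by
  by_cases hp : p = ""
  · simp [hp]
  · have hp' : (p != "") = true := by simp [hp]
    by_cases hsw : PySem.Str.startswith full (p ++ "_") = true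
    · have hpre : (p ++ "_").toList.isPrefixOf full.toList = true := by
        have := hsw
        simp [PySem.Str.startswith, PySem.Chars.startswith] at this ⊢
        exact this
      rw [hp', hsw]
      simp only [Bool.true_and, if_pos]
      rw [pvRemovePrefix, if_pos hpre]
      refine String.toList_inj.mp ?_
      rw [String.toList_ofList]
      have hlen : ((p ++ "_").toList).length = p.toList.length + 1 := by
        simp
      have hnn : (0:Int) ≤ PySem.Str.len p + 1 := by
        simp [PySem.Str.len_eq]
        omega
      rw [PySem.Str.toList_slice]
      have htn : (PySem.Str.len p + 1).toNat = p.toList.length + 1 := by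
        rw [PySem.Str.len_eq]; omega
      simp only [PySem.Chars.slice_eq_listSlice, PySem.List.slice_from _ hnn, hlen, htn]

    · have hsw' : PySem.Str.startswith full (p ++ "_") = false := by simpa using hsw
      rw [hp', hsw']
      simp only [Bool.true_and, Bool.false_eq_true, if_false, if_true]
      rw [pvRemovePrefix]
      have hpre : (p ++ "_").toList.isPrefixOf full.toList = false := by
        rw [Bool.eq_false_iff]
        intro hcon
        apply hsw
        show PySem.Chars.startswith full.toList (p ++ "_").toList = true
        simpa [PySem.Chars.startswith] using hcon
      rw [if_neg (Bool.eq_false_iff.mp hpre)]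
      exact (String.ofList_toList).symm

-- the two module-name computations agree
theorem pvModEq (tag : String) :
    (if PySem.Str.isIn "_" (PySem.Str.replace tag "-" "_")
     then pvReplaceOnce (PySem.Str.replace tag "-" "_") ((((PySem.Str.split? tag "-").getD []).headD "") ++ "_")
     else PySem.Str.replace tag "-" "_")
      = String.ofList (pvRemoveFirst (PySem.Str.replace tag "-" "_").toList (tag.toList.takeWhile (· != '-') ++ ['_'])) := by
  by_cases hin : PySem.Str.isIn "_" (PySem.Str.replace tag "-" "_") = true
  · rw [if_pos hin]
    unfold pvReplaceOnce
    congr 1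
    rw [String.toList_append, pvSplitHead]
    rfl
  · rw [if_neg hin]
    rw [pvRemoveFirstNoop _ _ '_' (by simp) ?_, String.ofList_toList]
    intro hmem
    exact hin (by
      rw [PySem.Str.isIn_iff_infix]
      exact (List.singleton_infix_iff _ _).mpr (by simpa using hmem))

-- B's single pair-fold splits into the two string folds
theorem pvFoldlPair (l : List (List (String × String))) (p a b : String) :
    (l.foldl (fun acc comp => (acc.1 ++ pvImportLine comp p, acc.2 ++ pvAllLine comp p)) (a, b))
      = (l.foldl (fun s comp => s ++ pvImportLine comp p) a,
         l.foldl (fun s comp => s ++ pvAllLine comp p) b) := by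
  induction l generalizing a b with
  | nil => rfl
  | cons c t ih => simp [ih]

-- the shape of A's joined line list
theorem pvAssemble (nl h x z : List Char) (M1 M2 : List (List Char)) :
    PySem.Chars.join nl ([h, []] ++ M1 ++ [[], x] ++ M2 ++ [z])
      = h ++ nl ++ nl ++ (M1.map (· ++ nl)).flatten ++ (nl ++ x ++ nl ++ ((M2.map (· ++ nl)).flatten ++ z)) := by
  rw [show [h, ([] : List Char)] ++ M1 ++ [[], x] ++ M2 ++ [z] = (h :: [] :: M1) ++ (([] :: x :: M2) ++ [z]) by simp]
  rw [pvJoinAppend _ _ _ (by simp), pvJoinAppend _ _ _ (by simp), PySem.Chars.join_singleton]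
  simp

theorem generate_components_init_spec : Claim_equal_generate_components_init := by
  intro comps p _ _
  unfold Spec_generate_components_init generate_components_init generate_components_init_alt
  simp only [PySem.List.foldl_append_singleton_eq_map]
  refine String.toList_inj.mp ?_
  rw [PySem.Str.toList_join]
  rw [pvFoldlPair]
  simp only [String.toList_append, pvFoldlStrAppend]
  simp only [pvClsEq, pvModEq]
  simp only [List.map_append, List.map_cons, List.map_nil, List.map_map]
  simp only [show ("" : String).toList = [] from rfl]
  rw [show ("\n" : String).toList = ['\n'] from rfl, pvAssemble]
  rw [show ("\"\"\"All generated components.\"\"\"\n\n" : String).toList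
        = ("\"\"\"All generated components.\"\"\"" : String).toList ++ ['\n'] ++ ['\n'] from rfl]
  rw [show ("\n__all__ = [\n" : String).toList
        = ['\n'] ++ ("__all__ = [" : String).toList ++ ['\n'] from rfl]
  simp only [pvImportLine, pvAllLine, Function.comp_def, String.toList_append, List.map_map]
  simp [List.append_assoc, show ("\n" : String).toList = ['\n'] from rfl]
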